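-- pv_equiv track=rewrite | github.com/CassHsu/LeetCode-Python | 1827/1827-01.py | minOperations
-- ===== SOURCE A (Python) =====
-- from typing import List
--
-- def minOperations(nums: List[int]) -> int:
--     count = 0
--     prev = 0
--     for n in nums:
--         if n <= prev:
--             prev += 1
--             count += prev - n
--         else:
--             prev = n
--     return count
-- ===== SOURCE B (Python) =====
-- from typing import List
--
-- def minOperations(nums: List[int]) -> int:
--     # Two-pass: shift to t_i = nums[i]-(i+1), take 0-floored prefix maxima,
--     # then sum the gaps between each prefix max and its shifted value.
--     t = [n - i - 1 for i, n in enumerate(nums)]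
--     maxes = []
--     M = 0
--     for x in t:
--         M = max(M, x)
--         maxes.append(M)
--     return sum(m - x for m, x in zip(maxes, t))
-- ===== Notes on version B (the rewrite author's own statement) =====
-- stated objective: alternative
-- what changed: Replaces the single stateful loop tracking the previous raised value with a two-pass formulation: shift each element by its 1-based index, build the 0-floored prefix-maximum sequence, and sum the element-wise gaps.
import Mathlib
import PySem

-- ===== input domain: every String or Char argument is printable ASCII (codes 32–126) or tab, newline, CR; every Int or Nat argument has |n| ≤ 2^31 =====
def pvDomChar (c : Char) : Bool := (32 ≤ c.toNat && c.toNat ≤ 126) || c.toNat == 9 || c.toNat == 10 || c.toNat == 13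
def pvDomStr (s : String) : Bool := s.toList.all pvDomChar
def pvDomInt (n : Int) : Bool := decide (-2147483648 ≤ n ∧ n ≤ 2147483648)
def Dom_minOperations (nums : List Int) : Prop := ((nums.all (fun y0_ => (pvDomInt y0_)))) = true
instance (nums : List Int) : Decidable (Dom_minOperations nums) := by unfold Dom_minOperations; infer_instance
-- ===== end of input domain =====

-- B replaces A's stateful prev-tracking loop by a two-pass formulation over index-shifted values (alternative decomposition, same cost).


-- ===== PORT A =====
-- A's loop: state (count, prev); if n ≤ prev then prev += 1; count += prev - n else prev := n
def minOpStepA (s : Int × Int) (n : Int) : Int × Int :=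
  if n ≤ s.2 then (s.1 + ((s.2 + 1) - n), s.2 + 1) else (s.1, n)

def minOperations (nums : List Int) : Int :=
  (nums.foldl minOpStepA (0, 0)).1

-- ===== PORT B =====
-- prefix maxima of a list starting from accumulator M (B's second loop)
def prefixMaxes : List Int → Int → List Int
  | [], _ => []
  | x :: xs, M => (max M x) :: prefixMaxes xs (max M x)

def minOperations_alt (nums : List Int) : Int :=
  let t := (nums.zipIdx).map (fun p => p.1 - (p.2 : Int) - 1)
  let maxes := prefixMaxes t 0
  (((maxes.zip t).map (fun p => p.1 - p.2)).sum)

-- ===== PRECONDITION & SPEC =====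
def Spec_minOperations (nums : List Int) (out : Int) : Prop := out = minOperations_alt nums
instance (nums : List Int) (out : Int) : Decidable (Spec_minOperations nums out) := by unfold Spec_minOperations; infer_instance

-- ===== CLAIM (what is proved, stated in full; the proofs are below) =====
def Claim_equal_minOperations : Prop := ∀ (nums : List Int), Dom_minOperations nums → Spec_minOperations nums (minOperations nums)

-- ===== LEMMAS AND PROOFS =====

-- the right-hand side of B for a suffix starting at index i with running max M
def bSum (xs : List Int) (M : Int) (i : Nat) : Int :=
  let t := (xs.zipIdx i).map (fun p => p.1 - (p.2 : Int) - 1)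
  ((((prefixMaxes t M).zip t).map (fun p => p.1 - p.2)).sum)

theorem key (xs : List Int) : ∀ (count M : Int) (i : Nat),
    (xs.foldl minOpStepA (count, M + (i : Int))).1 = count + bSum xs M i := by
  induction xs with
  | nil => intro count M i; simp [bSum, prefixMaxes]
  | cons n xs ih =>
    intro count M i
    have hstep : minOpStepA (count, M + (i : Int)) n
        = (count + (max M (n - (i : Int) - 1) - (n - (i : Int) - 1)),
           max M (n - (i : Int) - 1) + ((i : Int) + 1)) := by
      simp only [minOpStepA]
      split_ifs with h
      · have hm : max M (n - (i : Int) - 1) = M := by omega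
        rw [hm, Prod.mk.injEq]; constructor <;> ring
      · have hm : max M (n - (i : Int) - 1) = n - (i : Int) - 1 := by omega
        rw [hm, Prod.mk.injEq]; constructor <;> ring
    have hi1 : (((i : Nat) + 1 : Nat) : Int) = (i : Int) + 1 := by push_cast; ring
    calc ((n :: xs).foldl minOpStepA (count, M + (i : Int))).1
        = (xs.foldl minOpStepA
            (count + (max M (n - (i : Int) - 1) - (n - (i : Int) - 1)),
             max M (n - (i : Int) - 1) + (((i : Nat) + 1 : Nat) : Int))).1 := by
          rw [List.foldl_cons, hstep, hi1]
      _ = count + (max M (n - (i : Int) - 1) - (n - (i : Int) - 1))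
            + bSum xs (max M (n - (i : Int) - 1)) (i + 1) := ih _ _ _
      _ = count + bSum (n :: xs) M i := by
          simp only [bSum, List.zipIdx, List.map_cons, prefixMaxes, List.zip_cons_cons,
            List.sum_cons]
          ring

-- ===== VERDICT (by name: the statement is the Claim_ definition above) =====
theorem minOperations_spec : Claim_equal_minOperations := by
  intro nums _
  show minOperations nums = minOperations_alt nums
  have h := key nums 0 0 0
  simpa [minOperations, minOperations_alt, bSum] using h
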